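-- pv_equiv track=rewrite | github.com/NWChemEx/TAMM | tamm_old/opmin/src/helper.py | nIdx2oneIdx
-- ===== SOURCE A (Python) =====
-- def nIdx2oneIdx(nidx,dims): # nidx = [1,0,0] , dims = [2,2,2] ==> idx = 8
--     sum = 0
--     for x in range(0,len(dims)):
--         factor = 1
--         for y in range(x+1,len(dims)):
--             factor *= dims[y]
--         sum += nidx[x]*factor
--     return sum
-- ===== SOURCE B (Python) =====
-- def nIdx2oneIdx(nidx, dims):  # Horner: one pass, running accumulator, no nested product loop
--     acc = 0
--     for i, d in enumerate(dims):
--         acc = acc * d + nidx[i]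
--     return acc
-- ===== Notes on version B (the rewrite author's own statement) =====
-- stated objective: faster
-- what changed: Replaced the quadratic nested loop (recomputing the suffix product of dims for every index) with a single Horner-style pass acc = acc*d + nidx[i].
import Mathlib
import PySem

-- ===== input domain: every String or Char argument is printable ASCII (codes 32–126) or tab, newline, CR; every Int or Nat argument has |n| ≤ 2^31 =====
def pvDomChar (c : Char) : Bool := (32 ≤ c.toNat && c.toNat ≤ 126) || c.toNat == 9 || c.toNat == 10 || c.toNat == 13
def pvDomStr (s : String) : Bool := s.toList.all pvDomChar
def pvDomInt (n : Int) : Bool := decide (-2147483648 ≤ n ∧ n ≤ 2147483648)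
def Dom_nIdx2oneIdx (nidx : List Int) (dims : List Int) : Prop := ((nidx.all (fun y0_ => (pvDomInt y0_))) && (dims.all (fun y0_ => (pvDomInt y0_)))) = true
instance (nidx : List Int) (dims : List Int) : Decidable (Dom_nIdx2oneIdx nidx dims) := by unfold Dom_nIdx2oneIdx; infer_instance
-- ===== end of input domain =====

-- B replaces A's quadratic nested loop (a suffix product of dims recomputed per index)
-- with a single Horner pass acc = acc*d + nidx[i]; asymptotically faster (O(n) vs O(n^2)).

-- ===== PORT A =====
-- pyGetD with default 0 is exact here: Pre_ guarantees every index is in range.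
def nIdx2oneIdx (nidx : List Int) (dims : List Int) : Int :=
  (PySem.List.pyRange 0 (dims.length : Int) 1).foldl
    (fun sum x =>
      sum + PySem.List.pyGetD nidx x 0 *
        ((PySem.List.pyRange (x + 1) (dims.length : Int) 1).foldl
          (fun factor y => factor * PySem.List.pyGetD dims y 0) 1)) 0

-- ===== PORT B =====
def nIdx2oneIdx_alt (nidx : List Int) (dims : List Int) : Int :=
  (PySem.List.enumerate dims 0).foldl
    (fun acc p => acc * p.2 + PySem.List.pyGetD nidx p.1 0) 0

-- ===== PRECONDITION & SPEC =====
-- Pre_ excludes exactly the inputs where Python A raises IndexError (nidx shorter than dims).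
def Pre_nIdx2oneIdx (nidx : List Int) (dims : List Int) : Prop := dims.length ≤ nidx.length
instance (nidx : List Int) (dims : List Int) : Decidable (Pre_nIdx2oneIdx nidx dims) := by unfold Pre_nIdx2oneIdx; infer_instance
def pvWitness_nIdx2oneIdx : List Int × List Int := ([1, 0, 0], [2, 2, 2])
def Spec_nIdx2oneIdx (nidx : List Int) (dims : List Int) (out : Int) : Prop := out = nIdx2oneIdx_alt nidx dims
instance (nidx : List Int) (dims : List Int) (out : Int) : Decidable (Spec_nIdx2oneIdx nidx dims out) := by unfold Spec_nIdx2oneIdx; infer_instance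

-- ===== CLAIM (what is proved, stated in full; the proofs are below) =====
def Claim_equal_nIdx2oneIdx : Prop := ∀ (nidx : List Int) (dims : List Int), Dom_nIdx2oneIdx nidx dims → Pre_nIdx2oneIdx nidx dims → Spec_nIdx2oneIdx nidx dims (nIdx2oneIdx nidx dims)

-- ===== LEMMAS AND PROOFS =====

-- Common reference value: the row-major sum with Nat indices.
def pvG (nidx : List Int) (dims : List Int) : Int :=
  ((List.range dims.length).map
    (fun k => nidx.getD k 0 * ((dims.drop (k + 1)).prod))).sum

theorem pvToNat_add_one (k : Nat) : ((k : Int) + 1).toNat = k + 1 := by omega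

theorem pvA_eq_G (nidx dims : List Int) : nIdx2oneIdx nidx dims = pvG nidx dims := by
  unfold nIdx2oneIdx
  rw [PySem.List.foldl_congr_mem _ _
      (fun sum x => sum + PySem.List.pyGetD nidx x 0 * ((dims.drop (x + 1).toNat).prod)) 0 ?_]
  · rw [PySem.List.foldl_add, PySem.List.pyRange_zero_natCast, List.map_map]
    unfold pvG
    simp only [Function.comp_def, PySem.List.pyGetD_natCast, pvToNat_add_one, zero_add]
  · intro acc x hx
    have hx1 : (0 : Int) ≤ x + 1 := by
      have := (PySem.List.mem_pyRange_one.mp hx).1; omega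
    rw [PySem.List.foldl_pyRange_pyGetD' dims 0 (fun factor y => factor * y) 1 hx1,
        ← List.prod_eq_foldl]

theorem pvB_eq_G (nidx dims : List Int) : nIdx2oneIdx_alt nidx dims = pvG nidx dims := by
  induction dims using List.reverseRecOn with
  | nil => simp [nIdx2oneIdx_alt, pvG, PySem.List.enumerate_nil]
  | append_singleton xs b ih =>
    unfold nIdx2oneIdx_alt at ih ⊢
    rw [PySem.List.enumerate_append, List.foldl_append, PySem.List.enumerate_cons,
        PySem.List.enumerate_nil]
    simp only [List.foldl_cons, List.foldl_nil, zero_add, PySem.List.pyGetD_natCast]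
    rw [ih]
    unfold pvG
    rw [List.length_append, List.length_singleton, List.range_succ, List.map_append,
        List.sum_append]
    have hlast : (xs ++ [b]).drop (xs.length + 1) = [] := by
      apply List.drop_eq_nil_of_le; simp
    have hmap : (List.range xs.length).map
        (fun k => nidx.getD k 0 * (((xs ++ [b]).drop (k + 1)).prod))
        = (List.range xs.length).map
        (fun k => nidx.getD k 0 * ((xs.drop (k + 1)).prod) * b) := by
      apply List.map_congr_left
      intro k hk
      have hk' : k + 1 ≤ xs.length := List.mem_range.mp hk
      rw [List.drop_append_of_le_length hk', List.prod_append, List.prod_singleton, mul_assoc]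
    rw [hmap, List.sum_map_mul_right]
    simp [hlast]

-- ===== VERDICT (by name: the statement is the Claim_ definition above) =====
theorem nIdx2oneIdx_spec : Claim_equal_nIdx2oneIdx := by
  intro nidx dims _ _
  unfold Spec_nIdx2oneIdx
  rw [pvA_eq_G, pvB_eq_G]
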